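-- pv_equiv track=rewrite | github.com/gold-silver-copper/Textual-Multiplayer-Roguelike | game_test/worldgen.py | generate_hollow_rectangle
-- ===== SOURCE A (Python) =====
-- def generate_hollow_rectangle(width, height, starting_corner):
--     x, y, z = starting_corner
--     if width <= 0 or height <= 0 or z < 0:
--         return []
--
--     # Calculate the coordinates for the opposite corner
--     opposite_corner = (x + width, y + height, z)
--
--     # Generate the list of coordinates for the rectangle with a hollow center
--     rectangle_coordinates = []
--     for i in range(x, opposite_corner[0]):
--         for j in range(y, opposite_corner[1]):
--             if i == x or i == opposite_corner[0] - 1 or j == y or j == opposite_corner[1] - 1: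
--                 rectangle_coordinates.append((i, j,z))
--
--     return rectangle_coordinates
-- ===== SOURCE B (Python) =====
-- def generate_hollow_rectangle(width, height, starting_corner):
--     x, y, z = starting_corner
--     if width <= 0 or height <= 0 or z < 0:
--         return []
--     # Emit only the perimeter cells, column by column (same order as scanning
--     # the full grid): full left column, two cells (or one if height == 1) per
--     # interior column, full right column.
--     left = [(x, j, z) for j in range(y, y + height)]
--     if width == 1:
--         return left
--     if height == 1:
--         middle = [(i, y, z) for i in range(x + 1, x + width - 1)]
--     else:
--         middle = []
--         for i in range(x + 1, x + width - 1):
--             middle.append((i, y, z))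
--             middle.append((i, y + height - 1, z))
--     right = [(x + width - 1, j, z) for j in range(y, y + height)]
--     return left + middle + right
-- ===== Notes on version B (the rewrite author's own statement) =====
-- stated objective: faster
-- what changed: Instead of scanning all width*height cells and filtering border cells, B emits only the perimeter cells directly (full first/last columns, top+bottom cell per interior column) in the same column-then-row order.
import Mathlib
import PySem

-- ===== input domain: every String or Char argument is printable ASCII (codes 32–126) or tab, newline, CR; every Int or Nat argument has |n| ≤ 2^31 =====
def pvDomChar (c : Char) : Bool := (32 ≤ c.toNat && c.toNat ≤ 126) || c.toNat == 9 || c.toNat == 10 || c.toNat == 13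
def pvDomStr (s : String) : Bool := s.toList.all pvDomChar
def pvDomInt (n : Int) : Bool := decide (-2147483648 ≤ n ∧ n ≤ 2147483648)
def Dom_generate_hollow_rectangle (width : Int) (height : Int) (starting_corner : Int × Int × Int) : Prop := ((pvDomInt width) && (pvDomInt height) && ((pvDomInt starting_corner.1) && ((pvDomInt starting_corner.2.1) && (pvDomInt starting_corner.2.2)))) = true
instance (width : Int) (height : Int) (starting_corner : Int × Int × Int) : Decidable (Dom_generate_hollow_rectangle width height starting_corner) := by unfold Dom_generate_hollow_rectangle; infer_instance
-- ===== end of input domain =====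

-- B replaces A's O(width*height) scan-and-filter of the whole grid by directly emitting
-- only the perimeter cells in the same column-then-row order (objective: faster, asymptotic).


-- ===== PORT A =====
def generate_hollow_rectangle (width : Int) (height : Int) (starting_corner : Int × Int × Int) : List (Int × Int × Int) :=
  let x := starting_corner.1
  let y := starting_corner.2.1
  let z := starting_corner.2.2
  if width ≤ 0 ∨ height ≤ 0 ∨ z < 0 then []
  else
    let ox := x + width
    let oy := y + height
    (PySem.List.pyRange x ox 1).foldl (fun acc i =>
      (PySem.List.pyRange y oy 1).foldl (fun acc2 j =>
        if (i == x || i == ox - 1 || j == y || j == oy - 1) then acc2 ++ [(i, j, z)] else acc2)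
        acc) []

-- ===== PORT B =====
def generate_hollow_rectangle_alt (width : Int) (height : Int) (starting_corner : Int × Int × Int) : List (Int × Int × Int) :=
  let x := starting_corner.1
  let y := starting_corner.2.1
  let z := starting_corner.2.2
  if width ≤ 0 ∨ height ≤ 0 ∨ z < 0 then []
  else
    let left := (PySem.List.pyRange y (y + height) 1).map (fun j => (x, j, z))
    if width = 1 then left
    else
      let middle :=
        if height = 1 then
          (PySem.List.pyRange (x + 1) (x + width - 1) 1).map (fun i => (i, y, z))
        else
          (PySem.List.pyRange (x + 1) (x + width - 1) 1).foldl
            (fun acc i => acc ++ [(i, y, z), (i, y + height - 1, z)]) []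
      let right := (PySem.List.pyRange y (y + height) 1).map (fun j => (x + width - 1, j, z))
      left ++ middle ++ right

-- ===== PRECONDITION & SPEC =====
def Spec_generate_hollow_rectangle (width : Int) (height : Int) (starting_corner : Int × Int × Int) (out : List (Int × Int × Int)) : Prop := out = generate_hollow_rectangle_alt width height starting_corner
instance (width : Int) (height : Int) (starting_corner : Int × Int × Int) (out : List (Int × Int × Int)) : Decidable (Spec_generate_hollow_rectangle width height starting_corner out) := by unfold Spec_generate_hollow_rectangle; infer_instance

-- ===== CLAIM (what is proved, stated in full; the proofs are below) =====
def Claim_equal_generate_hollow_rectangle : Prop := ∀ (width : Int) (height : Int) (starting_corner : Int × Int × Int), Dom_generate_hollow_rectangle width height starting_corner → Spec_generate_hollow_rectangle width height starting_corner (generate_hollow_rectangle width height starting_corner)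

-- ===== LEMMAS AND PROOFS =====

-- A's result as a flatMap of per-column filtered rows.
theorem ghr_A_flatMap (x y z ox oy : Int) :
    (PySem.List.pyRange x ox 1).foldl (fun acc i =>
      (PySem.List.pyRange y oy 1).foldl (fun acc2 j =>
        if (i == x || i == ox - 1 || j == y || j == oy - 1) then acc2 ++ [(i, j, z)] else acc2)
        acc) []
    = (PySem.List.pyRange x ox 1).flatMap (fun i =>
        ((PySem.List.pyRange y oy 1).filter
          (fun j => i == x || i == ox - 1 || j == y || j == oy - 1)).map (fun j => (i, j, z))) := by
  have hinner : ∀ (i : Int) (acc : List (Int × Int × Int)),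
      (PySem.List.pyRange y oy 1).foldl (fun acc2 j =>
        if (i == x || i == ox - 1 || j == y || j == oy - 1) then acc2 ++ [(i, j, z)] else acc2) acc
      = acc ++ ((PySem.List.pyRange y oy 1).filter
          (fun j => i == x || i == ox - 1 || j == y || j == oy - 1)).map (fun j => (i, j, z)) := by
    intro i acc
    exact PySem.List.foldl_append_if _ _ _ _
  calc (PySem.List.pyRange x ox 1).foldl (fun acc i =>
        (PySem.List.pyRange y oy 1).foldl (fun acc2 j =>
          if (i == x || i == ox - 1 || j == y || j == oy - 1) then acc2 ++ [(i, j, z)] else acc2)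
          acc) []
      = (PySem.List.pyRange x ox 1).foldl (fun acc i =>
          acc ++ ((PySem.List.pyRange y oy 1).filter
            (fun j => i == x || i == ox - 1 || j == y || j == oy - 1)).map (fun j => (i, j, z))) [] := by
        exact PySem.List.foldl_congr_mem _ _ _ _ (fun acc i _ => hinner i acc)
    _ = _ := by
        rw [PySem.List.foldl_append_eq_flatMap]
        simp

-- A full row: for i = x or i = ox - 1 the filter keeps everything.
theorem ghr_filter_full (x y ox oy i : Int) (hi : i = x ∨ i = ox - 1) :
    (PySem.List.pyRange y oy 1).filter
      (fun j => i == x || i == ox - 1 || j == y || j == oy - 1)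
    = PySem.List.pyRange y oy 1 := by
  apply List.filter_eq_self.mpr
  intro j _
  rcases hi with h | h <;> simp [h]

-- An interior column keeps exactly its first and last cell (height ≥ 2).
theorem ghr_filter_interior (x y ox oy i : Int) (hx : x < i) (hi : i < ox - 1)
    (h2 : y + 2 ≤ oy) :
    (PySem.List.pyRange y oy 1).filter
      (fun j => i == x || i == ox - 1 || j == y || j == oy - 1)
    = [y, oy - 1] := by
  have hix : (i == x) = false := by simp; omega
  have hio : (i == ox - 1) = false := by simp; omega
  have hsplit : PySem.List.pyRange y oy 1
      = PySem.List.pyRange y (y + 1) 1 ++ (PySem.List.pyRange (y + 1) (oy - 1) 1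
        ++ PySem.List.pyRange (oy - 1) oy 1) := by
    rw [← PySem.List.pyRange_one_append (y + 1) (oy - 1) oy (by omega) (by omega),
        ← PySem.List.pyRange_one_append y (y + 1) oy (by omega) (by omega)]
  have h1 : PySem.List.pyRange y (y + 1) 1 = [y] := PySem.List.pyRange_one_singleton y
  have h3 : PySem.List.pyRange (oy - 1) oy 1 = [oy - 1] := by
    have := PySem.List.pyRange_one_singleton (oy - 1)
    simpa [show oy - 1 + 1 = oy by omega] using this
  have hmid : (PySem.List.pyRange (y + 1) (oy - 1) 1).filter
      (fun j => i == x || i == ox - 1 || j == y || j == oy - 1) = [] := by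
    apply List.filter_eq_nil_iff.mpr
    intro j hj
    have := PySem.List.mem_pyRange_one.mp hj
    simp [hix, hio]
    omega
  rw [hsplit, List.filter_append, List.filter_append, h1, h3, hmid]
  simp [hix, hio]

-- An interior column of a height-1 rectangle keeps exactly its single cell.
theorem ghr_filter_interior_one (x y ox i : Int) (hx : x < i) (hi : i < ox - 1) :
    (PySem.List.pyRange y (y + 1) 1).filter
      (fun j => i == x || i == ox - 1 || j == y || j == y + 1 - 1)
    = [y] := by
  have hix : (i == x) = false := by simp; omega
  have hio : (i == ox - 1) = false := by simp; omega
  rw [PySem.List.pyRange_one_singleton]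
  simp [hix, hio]

-- ===== VERDICT (by name: the statement is the Claim_ definition above) =====
theorem generate_hollow_rectangle_spec : Claim_equal_generate_hollow_rectangle := by
  intro width height c _
  unfold Spec_generate_hollow_rectangle
  obtain ⟨x, y, z⟩ := c
  simp only [generate_hollow_rectangle, generate_hollow_rectangle_alt]
  by_cases hg : width ≤ 0 ∨ height ≤ 0 ∨ z < 0
  · simp [hg]
  · push Not at hg
    obtain ⟨hw, hh, hz⟩ := hg
    simp only [if_neg (by push Not; exact ⟨hw, hh, hz⟩ : ¬ (width ≤ 0 ∨ height ≤ 0 ∨ z < 0))]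
    rw [ghr_A_flatMap]
    by_cases hw1 : width = 1
    · -- single column: the filter is full everywhere
      subst hw1
      rw [if_pos rfl, PySem.List.pyRange_one_singleton]
      simp only [List.flatMap_cons, List.flatMap_nil, List.append_nil]
      rw [ghr_filter_full x y (x + 1) (y + height) x (Or.inl rfl)]
    · rw [if_neg hw1]
      have hw2 : 2 ≤ width := by omega
      -- split the x-range into first column, interior, last column
      have hxsplit : PySem.List.pyRange x (x + width) 1
          = [x] ++ (PySem.List.pyRange (x + 1) (x + width - 1) 1 ++ [x + width - 1]) := by
        rw [← PySem.List.pyRange_one_singleton x]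
        have h3 : PySem.List.pyRange (x + width - 1) (x + width) 1 = [x + width - 1] := by
          have := PySem.List.pyRange_one_singleton (x + width - 1)
          simpa [show x + width - 1 + 1 = x + width by omega] using this
        rw [← h3,
            ← PySem.List.pyRange_one_append (x + 1) (x + width - 1) (x + width) (by omega) (by omega),
            ← PySem.List.pyRange_one_append x (x + 1) (x + width) (by omega) (by omega)]
      rw [hxsplit]
      simp only [List.flatMap_append, List.flatMap_cons, List.flatMap_nil, List.append_nil]
      rw [ghr_filter_full x y (x + width) (y + height) x (Or.inl rfl),
          ghr_filter_full x y (x + width) (y + height) (x + width - 1) (Or.inr rfl)]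
      by_cases hh1 : height = 1
      · subst hh1
        rw [if_pos rfl]
        have hmid : (PySem.List.pyRange (x + 1) (x + width - 1) 1).flatMap (fun i =>
            ((PySem.List.pyRange y (y + 1) 1).filter
              (fun j => i == x || i == x + width - 1 || j == y || j == y + 1 - 1)).map
                (fun j => (i, j, z)))
            = (PySem.List.pyRange (x + 1) (x + width - 1) 1).map (fun i => (i, y, z)) := by
          rw [List.flatMap_eq_foldl,
            PySem.List.foldl_congr_mem (PySem.List.pyRange (x + 1) (x + width - 1) 1) _
              (fun acc i => acc ++ [(i, y, z)]) []
              (by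
                intro acc i hi
                have hmem := PySem.List.mem_pyRange_one.mp hi
                rw [ghr_filter_interior_one x y (x + width) i (by omega) (by omega)]
                simp),
            PySem.List.foldl_append_singleton_eq_map]
          simp
        rw [hmid]
        simp
      · rw [if_neg hh1]
        have hh2 : y + 2 ≤ y + height := by omega
        have hmid : (PySem.List.pyRange (x + 1) (x + width - 1) 1).flatMap (fun i =>
            ((PySem.List.pyRange y (y + height) 1).filter
              (fun j => i == x || i == x + width - 1 || j == y || j == y + height - 1)).map
                (fun j => (i, j, z)))
            = (PySem.List.pyRange (x + 1) (x + width - 1) 1).foldl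
                (fun acc i => acc ++ [(i, y, z), (i, y + height - 1, z)]) [] := by
          rw [List.flatMap_eq_foldl]
          exact PySem.List.foldl_congr_mem _ _ _ []
            (by
              intro acc i hi
              have hmem := PySem.List.mem_pyRange_one.mp hi
              rw [ghr_filter_interior x y (x + width) (y + height) i (by omega) (by omega) hh2]
              simp)
        rw [hmid]
        simp [List.append_assoc]
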